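-- pv_equiv track=rewrite | github.com/xaubre02/projects | bit/4bit/ipp/projekt2/fsm.py | __removeRedudancy
-- ===== SOURCE A (Python) =====
-- def __removeRedudancy(Sets):
--     # serazeni podle poctu prvku v mnozine od nejmensiho po nejvetsi
--     Sets.sort(key = len)
--
--     # prochazi jednotlive mnoziny pocinaje nejmensi a z ostatnich mnozin odtranuje stavy obsazene v teto mnozine
--     pos = 0
--     while pos < len(Sets):
--         for state in Sets[pos]:
--             for SET in Sets[pos + 1:]:
--                 if state in SET:
--                     SET.remove(state)
--
--         pos += 1
--
--     # odstrani vznikle prazdne mnoziny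
--     while [] in Sets:
--         Sets.remove([])
--
--     return Sets
-- ===== SOURCE B (Python) =====
-- def __removeRedudancy(Sets):
--     # Go over the sets from smallest to largest, keep of each set only the states
--     # not already covered by a smaller set, and drop sets that end up empty.
--     seen = set()
--     result = []
--     for s in sorted(Sets, key=len):
--         kept = [v for v in s if v not in seen]
--         if kept:
--             result.append(kept)
--         seen.update(s)
--     return result
-- ===== Notes on version B (the rewrite author's own statement) =====
-- stated objective: faster
-- what changed: A repeatedly mutates every later set for each element of each set (nested scans with list.remove); B makes one pass over the length-sorted sets with a running 'seen' set, filtering each set once. Pre_ excludes inputs where an inner list contains a duplicate element: the lists represent sets of FSM states, and on duplicates A's occurrence-by-occurrence list.remove and B's set-wise filtering are equally accidental choices.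
-- outside the precondition, e.g. on __removeRedudancy([[1], [1, 1]]): A returns [[1], [1]], B returns [[1]]
import Mathlib
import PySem

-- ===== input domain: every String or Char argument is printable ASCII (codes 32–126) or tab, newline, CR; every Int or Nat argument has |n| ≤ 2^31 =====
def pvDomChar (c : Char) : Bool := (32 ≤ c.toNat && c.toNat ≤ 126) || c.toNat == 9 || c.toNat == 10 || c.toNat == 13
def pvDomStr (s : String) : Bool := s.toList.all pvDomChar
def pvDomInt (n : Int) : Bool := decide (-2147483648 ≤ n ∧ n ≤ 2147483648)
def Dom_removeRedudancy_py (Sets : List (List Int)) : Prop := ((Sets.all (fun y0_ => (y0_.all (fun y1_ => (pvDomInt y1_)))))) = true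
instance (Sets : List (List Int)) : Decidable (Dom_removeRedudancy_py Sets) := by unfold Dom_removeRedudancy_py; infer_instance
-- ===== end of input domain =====

-- B replaces A's quadratic remove-from-every-later-set loops by one pass over the
-- length-sorted sets with a running 'seen' set (objective: faster, measured asymptotic).
-- A sorts its argument and empties inner lists in place; the equivalence proved here is
-- about the return value only (B does not mutate its argument).

-- ===== PORT A =====
-- 'if state in SET: SET.remove(state)'
def pyRemoveOnce (SET : List Int) (state : Int) : List Int :=
  if state ∈ SET then (PySem.List.remove? SET state).getD SET else SET

-- 'for state in Sets[pos]: for SET in Sets[pos+1:]: if state in SET: SET.remove(state)'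
def pyRemoveStates (s : List Int) (tail : List (List Int)) : List (List Int) :=
  s.foldl (fun tl state => tl.map (fun SET => pyRemoveOnce SET state)) tail

-- removal never changes the number of sets (cited by loopA's termination proof)
theorem pyRemoveStates_length (s : List Int) (tail : List (List Int)) :
    (pyRemoveStates s tail).length = tail.length := by
  induction s generalizing tail with
  | nil => rfl
  | cons v s' ih =>
    have : pyRemoveStates (v :: s') tail
        = pyRemoveStates s' (tail.map (fun SET => pyRemoveOnce SET v)) := rfl
    rw [this, ih, List.length_map]

-- the 'while pos < len(Sets)' loop: entries before pos are final, the tail is mutated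
def loopA : List (List Int) → List (List Int)
  | [] => []
  | s :: rest => s :: loopA (pyRemoveStates s rest)
termination_by l => l.length
decreasing_by simp [pyRemoveStates_length]

-- 'while [] in Sets: Sets.remove([])'
def dropEmptiesA (l : List (List Int)) : List (List Int) :=
  if h : ([] : List Int) ∈ l then dropEmptiesA ((PySem.List.remove? l []).getD l) else l
termination_by l.length
decreasing_by
  rw [PySem.List.remove?_eq_some_erase l [] h]
  have h1 := List.length_erase_of_mem h
  have h2 : 1 ≤ l.length := List.length_pos_of_mem h
  simp only [Option.getD_some]
  omega

def removeRedudancy_py (Sets : List (List Int)) : List (List Int) :=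
  dropEmptiesA (loopA (PySem.List.sorted Sets (fun s => (s.length : Int))))

-- ===== PORT B =====
-- loop body: 'kept = [v for v in s if v not in seen]; if kept: result.append(kept); seen.update(s)'
def bStep (acc : List (List Int) × PySem.Set Int) (s : List Int) :
    List (List Int) × PySem.Set Int :=
  let kept := s.filter (fun v => !(PySem.Set.contains acc.2 v))
  (if kept = [] then acc.1 else acc.1 ++ [kept], PySem.Set.update acc.2 s)

def removeRedudancy_py_alt (Sets : List (List Int)) : List (List Int) :=
  ((PySem.List.sorted Sets (fun s => (s.length : Int))).foldl bStep
    ([], PySem.Set.empty)).1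

-- ===== PRECONDITION & SPEC =====
-- Pre_ excludes inputs where some inner list contains a duplicate element: the inner
-- lists represent sets of states, and on duplicates A's occurrence-by-occurrence
-- list.remove and B's set-wise filtering are equally accidental choices.
def Pre_removeRedudancy_py (Sets : List (List Int)) : Prop := ∀ s ∈ Sets, s.Nodup
instance (Sets : List (List Int)) : Decidable (Pre_removeRedudancy_py Sets) := by unfold Pre_removeRedudancy_py; infer_instance

def pvWitness_removeRedudancy_py : List (List Int) := [[1, 2], [2, 3], [4]]

def Spec_removeRedudancy_py (Sets : List (List Int)) (out : List (List Int)) : Prop := out = removeRedudancy_py_alt Sets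
instance (Sets : List (List Int)) (out : List (List Int)) : Decidable (Spec_removeRedudancy_py Sets out) := by unfold Spec_removeRedudancy_py; infer_instance

-- ===== CLAIM (what is proved, stated in full; the proofs are below) =====
def Claim_equal_removeRedudancy_py : Prop := ∀ (Sets : List (List Int)), Dom_removeRedudancy_py Sets → Pre_removeRedudancy_py Sets → Spec_removeRedudancy_py Sets (removeRedudancy_py Sets)

-- ===== LEMMAS AND PROOFS =====

-- `dropC l c` drops, for each value v, the first `max 0 (c v)` occurrences of v from l.
def dropC : List Int → (Int → Int) → List Int
  | [], _ => []
  | x :: xs, c => if 0 < c x then dropC xs (fun v => if v = x then c v - 1 else c v) else x :: dropC xs c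

-- the Int-valued multiplicity of v in s
def cntI (s : List Int) (v : Int) : Int := (s.count v : Int)

def maxC (c1 c2 : Int → Int) : Int → Int := fun v => max (c1 v) (c2 v)

-- the common specification: filter each length-sorted set by the running multiplicities
def specLoop : List (List Int) → (Int → Int) → List (List Int)
  | [], _ => []
  | s :: r, seen =>
    let t := dropC s seen
    let rest := specLoop r (maxC seen (cntI s))
    if t = [] then rest else t :: rest

theorem dropC_nonpos (l : List Int) (c : Int → Int) (h : ∀ v, c v ≤ 0) : dropC l c = l := by
  induction l with
  | nil => rfl
  | cons x xs ih => simp [dropC, ih, not_lt.mpr (h x)]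

theorem pyRemoveOnce_eq_dropC (SET : List Int) (v : Int) :
    pyRemoveOnce SET v = dropC SET (fun x => if x = v then 1 else 0) := by
  induction SET with
  | nil => simp [pyRemoveOnce, dropC]
  | cons x xs ih =>
    by_cases hxv : x = v
    · subst hxv
      have : dropC (x :: xs) (fun y => if y = x then 1 else 0)
          = dropC xs (fun _ => (0 : Int)) := by
        simp only [dropC, if_pos rfl]
        norm_num
        congr 1
        funext y
        by_cases hy : y = x <;> simp [hy]
      rw [this, dropC_nonpos _ _ (fun _ => le_refl 0)]
      simp [pyRemoveOnce, PySem.List.remove?_cons_self]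
    · have hstep : dropC (x :: xs) (fun y => if y = v then 1 else 0)
          = x :: dropC xs (fun y => if y = v then 1 else 0) := by
        simp [dropC, hxv]
      rw [hstep, ← ih]
      unfold pyRemoveOnce
      by_cases hv : v ∈ xs
      · have hm : v ∈ x :: xs := List.mem_cons_of_mem x hv
        rw [if_pos hm, if_pos hv, PySem.List.remove?_cons_of_ne xs hxv,
            PySem.List.remove?_eq_some_erase xs v hv]
        simp
      · have hm : v ∉ x :: xs := by
          simp only [List.mem_cons, not_or]
          exact ⟨fun hh => hxv hh.symm, hv⟩
        rw [if_neg hm, if_neg hv]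

theorem dropC_comp (l : List Int) (c1 c2 : Int → Int)
    (h1 : ∀ v, 0 ≤ c1 v) (h2 : ∀ v, 0 ≤ c2 v) :
    dropC (dropC l c1) c2 = dropC l (fun v => c1 v + c2 v) := by
  induction l generalizing c1 c2 with
  | nil => simp [dropC]
  | cons x xs ih =>
    by_cases hx1 : 0 < c1 x
    · have hx12 : 0 < c1 x + c2 x := by have := h2 x; omega
      simp only [dropC, if_pos hx1, if_pos hx12]
      rw [ih _ _ (fun v => by by_cases hv : v = x <;> simp [hv] <;> [omega; exact h1 v]) h2]
      congr 1
      funext v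
      by_cases hv : v = x <;> simp [hv] <;> omega
    · have hx1' : c1 x = 0 := le_antisymm (not_lt.mp hx1) (h1 x)
      simp only [dropC, if_neg hx1]
      by_cases hx2 : 0 < c2 x
      · have hx12 : 0 < c1 x + c2 x := by omega
        simp only [dropC, if_pos hx2, if_pos hx12]
        rw [ih _ _ h1 (fun v => by by_cases hv : v = x <;> simp [hv] <;> [omega; exact h2 v])]
        congr 1
        funext v
        by_cases hv : v = x <;> simp [hv] <;> omega
      · have hx12 : ¬ 0 < c1 x + c2 x := by have := h2 x; omega
        simp only [dropC, if_neg hx2, if_neg hx12]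
        rw [ih _ _ h1 h2]

theorem cntI_nonneg (s : List Int) (v : Int) : 0 ≤ cntI s v := by
  simp [cntI]

theorem cntI_cons (x : Int) (s : List Int) (v : Int) :
    cntI (x :: s) v = (if v = x then 1 else 0) + cntI s v := by
  simp [cntI, List.count_cons]
  by_cases hv : v = x <;> simp [hv] <;> push_cast <;> omega

theorem pyRemoveStates_eq (s : List Int) (tail : List (List Int)) :
    pyRemoveStates s tail = tail.map (fun SET => dropC SET (cntI s)) := by
  induction s generalizing tail with
  | nil =>
    have h0 : ∀ SET : List Int, dropC SET (cntI []) = SET := fun SET =>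
      dropC_nonpos _ _ (fun v => by simp [cntI])
    simp [pyRemoveStates, h0]
  | cons v s' ih =>
    have : pyRemoveStates (v :: s') tail
        = pyRemoveStates s' (tail.map (fun SET => pyRemoveOnce SET v)) := rfl
    rw [this, ih, List.map_map]
    apply List.map_congr_left
    intro SET _
    simp only [Function.comp]
    rw [pyRemoveOnce_eq_dropC,
        dropC_comp _ _ _ (fun x => by by_cases hx : x = v <;> simp [hx]) (cntI_nonneg s')]
    congr 1
    funext x
    rw [cntI_cons]

theorem cntI_dropC (s : List Int) (seen : Int → Int) (hs : ∀ v, 0 ≤ seen v) (v : Int) :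
    cntI (dropC s seen) v = max 0 (cntI s v - seen v) := by
  induction s generalizing seen with
  | nil => simp [dropC, cntI]; have := hs v; omega
  | cons x xs ih =>
    by_cases hx : 0 < seen x
    · simp only [dropC, if_pos hx]
      rw [ih _ (fun w => by by_cases hw : w = x <;> simp [hw] <;> first | omega | exact hs w)]
      rw [cntI_cons]
      by_cases hv : v = x <;> simp [hv] <;> omega
    · have hx0 : seen x = 0 := le_antisymm (not_lt.mp hx) (hs x)
      simp only [dropC, if_neg hx]
      rw [cntI_cons, ih _ hs, cntI_cons]
      have hnn := cntI_nonneg xs v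
      by_cases hv : v = x
      · subst hv
        simp only [if_pos rfl]
        omega
      · simp [hv]

theorem loopA_spec (l : List (List Int)) (seen : Int → Int) (hs : ∀ v, 0 ≤ seen v) :
    (loopA (l.map (fun SET => dropC SET seen))).filter (fun t => !t.isEmpty)
      = specLoop l seen := by
  induction l generalizing seen with
  | nil => simp [loopA, specLoop]
  | cons s r ih =>
    have hmap : (s :: r).map (fun SET => dropC SET seen)
        = dropC s seen :: r.map (fun SET => dropC SET seen) := rfl
    rw [hmap]
    have htail : pyRemoveStates (dropC s seen) (r.map (fun SET => dropC SET seen))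
        = r.map (fun SET => dropC SET (maxC seen (cntI s))) := by
      rw [pyRemoveStates_eq, List.map_map]
      apply List.map_congr_left
      intro SET _
      simp only [Function.comp]
      rw [dropC_comp _ _ _ hs (cntI_nonneg _)]
      congr 1
      funext v
      rw [cntI_dropC s seen hs v]
      simp [maxC]
      omega
    have : loopA (dropC s seen :: r.map (fun SET => dropC SET seen))
        = dropC s seen :: loopA (r.map (fun SET => dropC SET (maxC seen (cntI s)))) := by
      simp [loopA, htail]
    rw [this]
    have hmax : ∀ v, 0 ≤ maxC seen (cntI s) v := fun v => by
      simp [maxC]; left; exact hs v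
    by_cases ht : dropC s seen = []
    · simp [ht, List.filter, ih _ hmax, specLoop]
    · have : (dropC s seen).isEmpty = false := by
        cases h : dropC s seen <;> simp_all
      simp [List.filter, this, ih _ hmax, specLoop, ht]

theorem filter_erase_nil (l : List (List Int)) :
    (l.erase ([] : List Int)).filter (fun t => !t.isEmpty)
      = l.filter (fun t => !t.isEmpty) := by
  induction l with
  | nil => rfl
  | cons x xs ih =>
    by_cases hx : x = ([] : List Int)
    · subst hx; simp [List.erase_cons, List.filter]
    · rw [List.erase_cons]
      have : (x == ([] : List Int)) = false := by simpa using hx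
      rw [this]
      simp only [List.filter]
      cases h : (!x.isEmpty) <;> simp_all

theorem dropEmptiesA_eq_filter (l : List (List Int)) :
    dropEmptiesA l = l.filter (fun t => !t.isEmpty) := by
  induction l using dropEmptiesA.induct with
  | case1 l h ih =>
    rw [dropEmptiesA, dif_pos h]
    rw [PySem.List.remove?_eq_some_erase l [] h] at ih ⊢
    simp only [Option.getD_some] at ih ⊢
    rw [ih, filter_erase_nil]
  | case2 l h =>
    rw [dropEmptiesA, dif_neg h]
    have : ∀ t ∈ l, (!t.isEmpty) = true := by
      intro t ht
      cases t with
      | nil => exact absurd ht h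
      | cons a b => simp
    exact (List.filter_eq_self.mpr this).symm

-- ===== B-side lemmas =====

-- the {0,1}-valued multiplicity function of a 'seen' set
def indC (S : PySem.Set Int) : Int → Int := fun v => if v ∈ S then 1 else 0

theorem dropC_congr_mem (l : List Int) (c1 c2 : Int → Int) (h : ∀ v ∈ l, c1 v = c2 v) :
    dropC l c1 = dropC l c2 := by
  induction l generalizing c1 c2 with
  | nil => rfl
  | cons x xs ih =>
    have hx := h x (List.mem_cons_self)
    simp only [dropC, hx]
    by_cases hc : 0 < c2 x
    · rw [if_pos hc, if_pos hc]
      exact ih _ _ (fun v hv => by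
        by_cases hvx : v = x <;> simp [hvx, hx, h v (List.mem_cons_of_mem x hv)])
    · rw [if_neg hc, if_neg hc, ih _ _ (fun v hv => h v (List.mem_cons_of_mem x hv))]

-- on a duplicate-free list, dropping by a {0,1} multiplicity is filtering
theorem dropC_indC (s : List Int) (S : PySem.Set Int) (hnd : s.Nodup) :
    dropC s (indC S) = s.filter (fun v => !(PySem.Set.contains S v)) := by
  induction s with
  | nil => rfl
  | cons x xs ih =>
    have hnd' := (List.nodup_cons.mp hnd).2
    have hx : x ∉ xs := (List.nodup_cons.mp hnd).1
    by_cases hm : x ∈ S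
    · have h1 : (0 : Int) < indC S x := by simp [indC, hm]
      have hcontains : PySem.Set.contains S x = true := by
        simpa [PySem.Set.contains_iff] using hm
      simp only [dropC, if_pos h1, List.filter, hcontains]
      rw [dropC_congr_mem _ _ (indC S) (fun v hv => by
        have : v ≠ x := fun hh => hx (hh ▸ hv)
        simp [this])]
      exact ih hnd'
    · have h1 : ¬ (0 : Int) < indC S x := by simp [indC, hm]
      have hcontains : PySem.Set.contains S x = false := by
        simp [PySem.Set.contains_eq_listContains]
        simpa using hm
      simp only [dropC, if_neg h1, List.filter, hcontains]
      simp [ih hnd']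

-- updating the seen set matches taking the pointwise max with the set's multiplicities
theorem indC_update (S : PySem.Set Int) (s : List Int) (hnd : s.Nodup) :
    indC (PySem.Set.update S s) = maxC (indC S) (cntI s) := by
  funext v
  have hcnt : cntI s v = if v ∈ s then 1 else 0 := by
    by_cases hv : v ∈ s
    · have := List.count_eq_one_of_mem hnd hv
      simp [cntI, hv, this]
    · simp [cntI, hv, List.count_eq_zero.mpr hv]
  simp only [indC, maxC, PySem.Set.mem_update, hcnt]
  by_cases h1 : v ∈ S <;> by_cases h2 : v ∈ s <;> simp [h1, h2]

theorem bFold_spec (l : List (List Int)) :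
    ∀ (res : List (List Int)) (S : PySem.Set Int),
    (∀ s ∈ l, s.Nodup) →
    (l.foldl bStep (res, S)).1 = res ++ specLoop l (indC S) := by
  induction l with
  | nil => intro res S _; simp [specLoop]
  | cons s r ih =>
    intro res S hnd
    have hnds : s.Nodup := hnd s List.mem_cons_self
    have hndr : ∀ t ∈ r, t.Nodup := fun t ht => hnd t (List.mem_cons_of_mem s ht)
    have hkept : s.filter (fun v => !(PySem.Set.contains S v)) = dropC s (indC S) :=
      (dropC_indC s S hnds).symm
    have hstep : (s :: r).foldl bStep (res, S)
        = r.foldl bStep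
            ((if s.filter (fun v => !(PySem.Set.contains S v)) = []
              then res
              else res ++ [s.filter (fun v => !(PySem.Set.contains S v))]),
             PySem.Set.update S s) := rfl
    rw [hstep, ih _ _ hndr, indC_update S s hnds, hkept]
    simp only [specLoop]
    by_cases ht : dropC s (indC S) = []
    · simp [ht]
    · simp [ht, List.append_assoc]

-- ===== VERDICT (by name: the statement is the Claim_ definition above) =====
theorem removeRedudancy_py_spec : Claim_equal_removeRedudancy_py := by
  intro Sets _ hpre
  unfold Spec_removeRedudancy_py removeRedudancy_py removeRedudancy_py_alt
  set sl := PySem.List.sorted Sets (fun s => (s.length : Int)) with hsl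
  have hA : dropEmptiesA (loopA sl) = specLoop sl (fun _ => 0) := by
    rw [dropEmptiesA_eq_filter]
    have hmap : sl.map (fun SET => dropC SET (fun _ => (0 : Int))) = sl := by
      have h0 : ∀ SET : List Int, dropC SET (fun _ => (0 : Int)) = SET := fun SET =>
        dropC_nonpos _ _ (fun _ => le_refl 0)
      simp [h0]
    conv_lhs => rw [← hmap]
    rw [loopA_spec sl (fun _ => 0) (fun _ => le_refl 0)]
  have hndsl : ∀ s ∈ sl, s.Nodup := by
    intro s hs
    exact hpre s ((PySem.List.mem_sorted _ _ _ _).mp hs)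
  have hB : ((sl.foldl bStep ([], PySem.Set.empty)).1 : List (List Int))
      = specLoop sl (fun _ => 0) := by
    rw [bFold_spec sl [] PySem.Set.empty hndsl]
    have : indC PySem.Set.empty = fun _ => (0 : Int) := by
      funext v
      simp [indC, PySem.Set.empty]
    rw [this]
    simp
  rw [hA, hB]
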